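-- pv_equiv track=rewrite | github.com/MylesMor/advent-of-code | 2024/day02/red_nosed_reports.py | get_validity_of_report
-- ===== SOURCE A (Python) =====
-- def get_validity_of_report(diff):
--     valid_count = 0
--     increasing = True if diff[0] > 0 else False
--     for item in diff:
--         if abs(item) not in [1,2,3] or (increasing and item < 0) or (not increasing and item > 0):
--             break
--         valid_count += 1
--     if valid_count == len(diff):
--         return 1
--     return 0
-- ===== SOURCE B (Python) =====
-- def get_validity_of_report(diff):
--     lo, hi = min(diff), max(diff)
--     if 1 <= lo and hi <= 3:
--         return 1
--     if -3 <= lo and hi <= -1: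
--         return 1
--     return 0
-- ===== Notes on version B (the rewrite author's own statement) =====
-- stated objective: alternative
-- what changed: Replaces A's direction-tracking loop with early break by two aggregate min/max computations and a range test: valid iff the whole range fits in [1,3] or in [-3,-1]; no direction flag or per-element membership test remains.
import Mathlib
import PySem

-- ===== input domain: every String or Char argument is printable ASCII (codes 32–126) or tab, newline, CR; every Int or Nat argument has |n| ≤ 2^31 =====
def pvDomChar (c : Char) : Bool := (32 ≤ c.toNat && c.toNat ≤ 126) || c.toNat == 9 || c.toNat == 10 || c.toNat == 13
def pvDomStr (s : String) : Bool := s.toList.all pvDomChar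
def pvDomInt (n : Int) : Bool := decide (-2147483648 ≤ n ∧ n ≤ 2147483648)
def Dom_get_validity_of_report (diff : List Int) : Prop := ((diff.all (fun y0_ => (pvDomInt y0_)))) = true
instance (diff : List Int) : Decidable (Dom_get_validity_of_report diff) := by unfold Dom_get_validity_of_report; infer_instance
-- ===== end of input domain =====

-- B replaces A's direction-tracking break-loop by min/max aggregates and a range test; return-value equivalence proved on nonempty inputs.

-- ===== PORT A =====
-- the for-loop with break: stops at the first invalid item, else counts it
def pvALoop (increasing : Bool) (xs : List Int) (acc : Int) : Int :=
  match xs with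
  | [] => acc
  | item :: rest =>
      if !(([1,2,3] : List Int).contains |item|) || (increasing && decide (item < 0)) || (!increasing && decide (item > 0)) then
        acc
      else
        pvALoop increasing rest (acc + 1)

def get_validity_of_report (diff : List Int) : Int :=
  let increasing : Bool := if (PySem.List.pyGet? diff 0).getD 0 > 0 then true else false
  let valid_count := pvALoop increasing diff 0
  if valid_count = (diff.length : Int) then 1 else 0

-- ===== PORT B =====
def get_validity_of_report_alt (diff : List Int) : Int :=
  let lo : Int := (PySem.List.min? diff (fun x => x)).getD 0
  let hi : Int := (PySem.List.max? diff (fun x => x)).getD 0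
  if 1 ≤ lo ∧ hi ≤ 3 then 1
  else if -3 ≤ lo ∧ hi ≤ -1 then 1
  else 0

-- ===== PRECONDITION & SPEC =====
-- Pre_ excludes only the empty list, on which A raises IndexError (diff[0]) and B raises ValueError (min([])).
def Pre_get_validity_of_report (diff : List Int) : Prop := diff ≠ []
instance (diff : List Int) : Decidable (Pre_get_validity_of_report diff) := by unfold Pre_get_validity_of_report; infer_instance
def pvWitness_get_validity_of_report : List Int := [1, 2, 3]

def Spec_get_validity_of_report (diff : List Int) (out : Int) : Prop := out = get_validity_of_report_alt diff
instance (diff : List Int) (out : Int) : Decidable (Spec_get_validity_of_report diff out) := by unfold Spec_get_validity_of_report; infer_instance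

-- ===== CLAIM (what is proved, stated in full; the proofs are below) =====
def Claim_equal_get_validity_of_report : Prop := ∀ (diff : List Int), Dom_get_validity_of_report diff → Pre_get_validity_of_report diff → Spec_get_validity_of_report diff (get_validity_of_report diff)

-- ===== LEMMAS AND PROOFS =====

-- A's per-element test fails (= loop continues) iff the element lies in the direction's range
lemma pv_test_false (inc : Bool) (x : Int) :
    ((!(([1,2,3] : List Int).contains |x|) || (inc && decide (x < 0)) || (!inc && decide (x > 0))) = false)
      ↔ (if inc then 1 ≤ x ∧ x ≤ 3 else -3 ≤ x ∧ x ≤ -1) := by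
  cases inc <;> simp <;> (rcases abs_cases x with ⟨h1, h2⟩ | ⟨h1, h2⟩ <;> rw [h1] <;> omega)

-- A's loop reaches the full length iff every element passes the test
lemma pv_loop_iff (inc : Bool) (xs : List Int) (acc : Int) :
    pvALoop inc xs acc = acc + (xs.length : Int)
      ↔ ∀ x ∈ xs, (!(([1,2,3] : List Int).contains |x|) || (inc && decide (x < 0)) || (!inc && decide (x > 0))) = false := by
  induction xs generalizing acc with
  | nil => simp [pvALoop]
  | cons y ys ih =>
    by_cases h : (!(([1,2,3] : List Int).contains |y|) || (inc && decide (y < 0)) || (!inc && decide (y > 0))) = true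
    · simp only [pvALoop, h, if_true]
      constructor
      · intro he; exfalso; simp only [List.length_cons] at he; push_cast at he; omega
      · intro hall; exact absurd (hall y (by simp)) (by simp only [h]; simp)
    · have h' : (!(([1,2,3] : List Int).contains |y|) || (inc && decide (y < 0)) || (!inc && decide (y > 0))) = false := by
        simpa using h
      simp only [pvALoop, h', Bool.false_eq_true, if_false, List.length_cons, List.mem_cons]
      have harith : acc + ((ys.length + 1 : Nat) : Int) = (acc + 1) + (ys.length : Int) := by push_cast; ring
      rw [harith, ih]
      constructor
      · intro hall x hx
        rcases hx with rfl | hx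
        · exact h'
        · exact hall x hx
      · intro hall x hx; exact hall x (Or.inr hx)

-- for a nonempty list, A's all-pass condition (with inc read off the head) is the range condition
lemma pv_allpass_iff (h : Int) (t : List Int) :
    (∀ x ∈ h :: t,
        (!(([1,2,3] : List Int).contains |x|)
          || ((if h > 0 then true else false) && decide (x < 0))
          || (!(if h > 0 then true else false) && decide (x > 0))) = false)
      ↔ ((∀ x ∈ h :: t, 1 ≤ x ∧ x ≤ 3) ∨ (∀ x ∈ h :: t, -3 ≤ x ∧ x ≤ -1)) := by
  by_cases hh : h > 0
  · rw [if_pos hh]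
    simp only [pv_test_false true, if_true]
    constructor
    · exact Or.inl
    · rintro (hall | hall)
      · exact hall
      · exfalso; have := hall h (by simp); omega
  · rw [if_neg hh]
    simp only [pv_test_false false]
    constructor
    · exact Or.inr
    · rintro (hall | hall)
      · exfalso; have := hall h (by simp); omega
      · exact hall
-- bounded range of all elements ⟺ bounds on min and max
lemma pv_range_iff (h : Int) (t : List Int) (a b : Int) :
    (∀ x ∈ h :: t, a ≤ x ∧ x ≤ b)
      ↔ (a ≤ ((PySem.List.min? (h :: t) (fun x => x)).getD 0)
          ∧ ((PySem.List.max? (h :: t) (fun x => x)).getD 0) ≤ b) := by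
  obtain ⟨m, hm⟩ : ∃ m, PySem.List.min? (h :: t) (fun x => x) = some m := by
    cases hc : PySem.List.min? (h :: t) (fun x => x) with
    | none => exact absurd ((PySem.List.min?_eq_none_iff _ _).mp hc) (by simp)
    | some m => exact ⟨m, rfl⟩
  obtain ⟨M, hM⟩ : ∃ M, PySem.List.max? (h :: t) (fun x => x) = some M := by
    cases hc : PySem.List.max? (h :: t) (fun x => x) with
    | none => exact absurd ((PySem.List.max?_eq_none_iff _ _).mp hc) (by simp)
    | some M => exact ⟨M, rfl⟩
  have hmmem := PySem.List.min?_mem hm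
  have hMmem := PySem.List.max?_mem hM
  have hmin := PySem.List.min?_isMin hm
  have hmax := PySem.List.max?_isMax hM
  rw [hm, hM]
  simp only [Option.getD_some]
  constructor
  · intro hall
    exact ⟨(hall m hmmem).1, (hall M hMmem).2⟩
  · intro ⟨ha, hb⟩ x hx
    exact ⟨le_trans ha (hmin x hx), le_trans (hmax x hx) hb⟩

theorem get_validity_of_report_spec : Claim_equal_get_validity_of_report := by
  intro diff _ hpre
  obtain ⟨h, t, rfl⟩ : ∃ h t, diff = h :: t := by
    cases diff with
    | nil => exact absurd rfl hpre
    | cons h t => exact ⟨h, t, rfl⟩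
  unfold Spec_get_validity_of_report get_validity_of_report get_validity_of_report_alt
  simp only
  have hhead : (PySem.List.pyGet? (h :: t) 0).getD 0 = h := by
    simp [PySem.List.pyGet?, PySem.List.pyIdx?]
  rw [hhead]
  have hiffA := pv_loop_iff (if h > 0 then true else false) (h :: t) 0
  simp only [zero_add] at hiffA
  by_cases hall : ∀ x ∈ h :: t,
      (!(([1,2,3] : List Int).contains |x|)
        || ((if h > 0 then true else false) && decide (x < 0))
        || (!(if h > 0 then true else false) && decide (x > 0))) = false
  · have hA : pvALoop (if h > 0 then true else false) (h :: t) 0 = ((h :: t).length : Int) := hiffA.mpr hall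
    rw [if_pos hA]
    rcases (pv_allpass_iff h t).mp hall with hr | hr
    · rw [if_pos ((pv_range_iff h t 1 3).mp hr)]
    · by_cases h13 : 1 ≤ ((PySem.List.min? (h :: t) (fun x => x)).getD 0)
          ∧ ((PySem.List.max? (h :: t) (fun x => x)).getD 0) ≤ 3
      · rw [if_pos h13]
      · rw [if_neg h13, if_pos ((pv_range_iff h t (-3) (-1)).mp hr)]
  · have hA : ¬ pvALoop (if h > 0 then true else false) (h :: t) 0 = ((h :: t).length : Int) :=
      fun hc => hall (hiffA.mp hc)
    rw [if_neg hA]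
    have hnr : ¬ ((∀ x ∈ h :: t, 1 ≤ x ∧ x ≤ 3) ∨ (∀ x ∈ h :: t, -3 ≤ x ∧ x ≤ -1)) :=
      fun hc => hall ((pv_allpass_iff h t).mpr hc)
    rw [if_neg (fun hc => hnr (Or.inl ((pv_range_iff h t 1 3).mpr hc))),
        if_neg (fun hc => hnr (Or.inr ((pv_range_iff h t (-3) (-1)).mpr hc)))]
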